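-- pv_equiv track=rewrite | github.com/Jingmingxia/Stat-q30-gc-content | q30_gc_stat.py | stat_qual
-- ===== SOURCE A (Python) =====
-- def stat_qual(qstr):
--     q20 = 0
--     q30 = 0
--     for q in qstr:
--         qual = ord(q) - 33   # ord function return the value of the ASCII
--         if qual >= 30:
--             q30 += 1
--             q20 += 1
--         elif qual >= 20:
--             q20 += 1
--     return q20, q30
-- ===== SOURCE B (Python) =====
-- def stat_qual(qstr):
--     hist = {}
--     for ch in qstr:
--         hist[ch] = hist.get(ch, 0) + 1
--     q20 = sum(n for ch, n in hist.items() if ord(ch) - 33 >= 20)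
--     q30 = sum(n for ch, n in hist.items() if ord(ch) - 33 >= 30)
--     return q20, q30
-- ===== Notes on version B (the rewrite author's own statement) =====
-- stated objective: alternative
-- what changed: B first aggregates the quality string into a character histogram and then sums counts over the distinct characters, instead of A's per-character branching scan with two running counters.
import Mathlib
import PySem

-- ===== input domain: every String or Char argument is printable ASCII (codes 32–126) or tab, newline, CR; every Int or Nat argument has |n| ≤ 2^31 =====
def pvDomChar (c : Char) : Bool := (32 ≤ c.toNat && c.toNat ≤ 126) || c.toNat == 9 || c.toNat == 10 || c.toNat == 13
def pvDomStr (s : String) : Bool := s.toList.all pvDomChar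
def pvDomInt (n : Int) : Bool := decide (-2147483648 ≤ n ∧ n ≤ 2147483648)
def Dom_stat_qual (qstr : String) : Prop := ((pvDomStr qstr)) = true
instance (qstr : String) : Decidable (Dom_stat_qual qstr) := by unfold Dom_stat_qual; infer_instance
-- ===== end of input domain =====

-- B aggregates the quality string into a character histogram and sums counts over distinct
-- characters, instead of A's per-character branching scan; same cost, different traversal.


-- ===== PORT A =====
-- for q in qstr: qual = ord(q) - 33; branch on qual ≥ 30 / qual ≥ 20
def stat_qual (qstr : String) : Int × Int :=
  qstr.toList.foldl
    (fun (acc : Int × Int) q =>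
      let qual : Int := (q.toNat : Int) - 33
      if qual ≥ 30 then (acc.1 + 1, acc.2 + 1)
      else if qual ≥ 20 then (acc.1 + 1, acc.2)
      else acc)
    (0, 0)

-- ===== PORT B =====
-- hist[ch] = hist.get(ch, 0) + 1 over the string, then two sums over hist.items()
def stat_qual_alt (qstr : String) : Int × Int :=
  let hist : PySem.Dict Char Int :=
    qstr.toList.foldl (fun d ch => d.insert ch (d.getD ch 0 + 1)) PySem.Dict.empty
  let q20 : Int :=
    ((hist.items.filter (fun kv => (kv.1.toNat : Int) - 33 ≥ 20)).map (·.2)).sum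
  let q30 : Int :=
    ((hist.items.filter (fun kv => (kv.1.toNat : Int) - 33 ≥ 30)).map (·.2)).sum
  (q20, q30)

-- ===== PRECONDITION & SPEC =====
def Spec_stat_qual (qstr : String) (out : Int × Int) : Prop := out = stat_qual_alt qstr
instance (qstr : String) (out : Int × Int) : Decidable (Spec_stat_qual qstr out) := by unfold Spec_stat_qual; infer_instance

-- ===== CLAIM (what is proved, stated in full; the proofs are below) =====
def Claim_equal_stat_qual : Prop := ∀ (qstr : String), Dom_stat_qual qstr → Spec_stat_qual qstr (stat_qual qstr)

-- ===== LEMMAS AND PROOFS =====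

-- A's loop counts, with running accumulators, the characters of quality ≥ 20 / ≥ 30.
theorem statA_foldl (l : List Char) (a b : Int) :
    l.foldl
      (fun (acc : Int × Int) q =>
        let qual : Int := (q.toNat : Int) - 33
        if qual ≥ 30 then (acc.1 + 1, acc.2 + 1)
        else if qual ≥ 20 then (acc.1 + 1, acc.2)
        else acc)
      (a, b)
    = (a + l.countP (fun q => decide ((q.toNat : Int) - 33 ≥ 20)),
       b + l.countP (fun q => decide ((q.toNat : Int) - 33 ≥ 30))) := by
  induction l generalizing a b with
  | nil => simp
  | cons x xs ih =>
    simp only [List.foldl_cons, List.countP_cons]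
    by_cases h30 : (x.toNat : Int) - 33 ≥ 30
    · have h20 : (x.toNat : Int) - 33 ≥ 20 := by omega
      simp [h20, h30, ih, Prod.ext_iff]
      omega
    · by_cases h20 : (x.toNat : Int) - 33 ≥ 20
      · simp [h20, h30, ih, Prod.ext_iff]
        omega
      · simp [h20, h30, ih]

-- a single character x contributes (if p x then 1 else 0) to a sum over a nodup list containing it
theorem sum_single_indicator (p : Char → Bool) (x : Char) (S : List Char)
    (hnd : S.Nodup) (hx : x ∈ S) :
    (S.map (fun k => if p k then (if x = k then (1 : Int) else 0) else 0)).sum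
      = (if p x then (1 : Int) else 0) := by
  induction S with
  | nil => cases hx
  | cons y ys ih =>
    simp only [List.map_cons, List.sum_cons]
    rcases List.mem_cons.mp hx with rfl | hmem
    · have hnotin : x ∉ ys := (List.nodup_cons.mp hnd).1
      have : (ys.map (fun k => if p k then (if x = k then (1 : Int) else 0) else 0)).sum = 0 := by
        rw [List.sum_eq_zero]
        intro z hz
        rcases List.mem_map.mp hz with ⟨k, hk, rfl⟩
        have : x ≠ k := fun h => hnotin (h ▸ hk)
        simp [this]
      simp [this]
    · have hne : y ≠ x := by
        rintro rfl; exact (List.nodup_cons.mp hnd).1 hmem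
      have : x ≠ y := fun h => hne h.symm
      rw [ih (List.nodup_cons.mp hnd).2 hmem]
      simp [this]

-- summing (if p k then l.count k else 0) over a nodup superset of l's elements is countP p l
theorem sum_count_indicator (p : Char → Bool) (l : List Char) (S : List Char)
    (hnd : S.Nodup) (hsub : ∀ x ∈ l, x ∈ S) :
    (S.map (fun k => if p k then (l.count k : Int) else 0)).sum = (l.countP p : Int) := by
  induction l with
  | nil => simp
  | cons x xs ih =>
    have hx : x ∈ S := hsub x (List.mem_cons_self)
    have hxs : ∀ y ∈ xs, y ∈ S := fun y hy => hsub y (List.mem_cons_of_mem _ hy)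
    have hsplit : ∀ k : Char,
        (if p k then ((x :: xs).count k : Int) else 0)
          = (if p k then (xs.count k : Int) else 0)
            + (if p k then (if x = k then (1 : Int) else 0) else 0) := by
      intro k
      by_cases hpk : p k
      · by_cases hxk : x = k
        · subst hxk
          simp [hpk, List.count_cons_self]
        · have hcount : (x :: xs).count k = xs.count k := by
            simp [hxk]
          simp [hpk, hxk, hcount]
      · simp [hpk]
    calc (S.map (fun k => if p k then ((x :: xs).count k : Int) else 0)).sum
        = (S.map (fun k =>
            (if p k then (xs.count k : Int) else 0)
              + (if p k then (if x = k then (1 : Int) else 0) else 0))).sum := by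
          congr 1; exact List.map_congr_left (fun k _ => hsplit k)
      _ = (S.map (fun k => if p k then (xs.count k : Int) else 0)).sum
            + (S.map (fun k => if p k then (if x = k then (1 : Int) else 0) else 0)).sum := by
          rw [← List.sum_map_add]
      _ = ((xs.countP p : Int)) + (if p x then (1 : Int) else 0) := by
          rw [ih hxs, sum_single_indicator p x S hnd hx]
      _ = ((x :: xs).countP p : Int) := by
          rw [List.countP_cons]
          by_cases hpx : p x <;> simp [hpx]

-- filter-then-project over the counter's items is the indicator sum over the distinct characters
theorem statB_sum (p : Char → Bool) (l : List Char) :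
    ((((PySem.Set.ofList l).map (fun k => (k, (l.count k : Int)))).filter
        (fun kv => p kv.1)).map (·.2)).sum
      = (l.countP p : Int) := by
  have h : ∀ S : List Char,
      (((S.map (fun k => (k, (l.count k : Int)))).filter (fun kv => p kv.1)).map (·.2)).sum
        = (S.map (fun k => if p k then (l.count k : Int) else 0)).sum := by
    intro S
    induction S with
    | nil => rfl
    | cons y ys ih =>
      by_cases hpy : p y <;> simp [hpy, ih]
  rw [h]
  exact sum_count_indicator p l _ (PySem.Set.nodup_ofList l)
    (fun x hx => (PySem.Set.mem_ofList l x).mpr hx)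

-- ===== VERDICT (by name: the statement is the Claim_ definition above) =====
theorem stat_qual_spec : Claim_equal_stat_qual := by
  intro qstr _
  unfold Spec_stat_qual stat_qual stat_qual_alt
  dsimp only
  rw [PySem.Dict.foldl_insert_getD_add_one_eq_counter, PySem.Dict.items_counter]
  have h20 := statB_sum (fun k => decide ((k.toNat : Int) - 33 ≥ 20)) qstr.toList
  have h30 := statB_sum (fun k => decide ((k.toNat : Int) - 33 ≥ 30)) qstr.toList
  rw [h20, h30, statA_foldl]
  simp
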